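-- pv_equiv track=rewrite | github.com/g1tsys/coding | Day 1 - Score 100/405-total_score.py | min_team_difference
-- ===== SOURCE A (Python) =====
-- from itertools import combinations
--
-- def min_team_difference(scores):
--     total_score = sum(scores)
--     min_diff = float('inf')
--
--     # Generate all combinations of 5 players
--     for team1 in combinations(range(10), 5):
--         team1_score = sum(scores[i] for i in team1)
--         team2_score = total_score - team1_score
--         diff = abs(team1_score - team2_score)
--         min_diff = min(min_diff, diff)
--
--         # Early exit if perfect split found
--         if min_diff == 0:
--             break
--
--     return min_diff
-- ===== SOURCE B (Python) =====
-- def min_team_difference(scores):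
--     total = sum(scores)
--     # exactly-k reachable subset sums over the first ten scores
--     d0, d1, d2, d3, d4, d5 = {0}, set(), set(), set(), set(), set()
--     for x in scores[:10]:
--         d5 = d5 | {s + x for s in d4}
--         d4 = d4 | {s + x for s in d3}
--         d3 = d3 | {s + x for s in d2}
--         d2 = d2 | {s + x for s in d1}
--         d1 = d1 | {s + x for s in d0}
--     return min(abs(2 * s - total) for s in d5)
-- ===== Notes on version B (the rewrite author's own statement) =====
-- stated objective: alternative
-- what changed: Replaces the enumeration of all 252 index combinations (with per-combination re-summing and an early-exit break) by a subset-sum DP that maintains, per team size k, the set of sums reachable with exactly k of the first ten scores, then takes min(|2*s - total|) over the size-5 sums. Pre_ excludes lists with fewer than 10 scores, on which A raises IndexError except when an accidental early perfect split breaks the loop first and returns 0 (a value reached without ever examining the out-of-range combinations).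
-- outside the precondition, e.g. on min_team_difference([0, 0, 0, 0, 0]): A returns 0, B returns 0; on min_team_difference([1, 2, 3, 4, 5, 6, 7, 8, 9]): A raises IndexError, B returns 1
import Mathlib
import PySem

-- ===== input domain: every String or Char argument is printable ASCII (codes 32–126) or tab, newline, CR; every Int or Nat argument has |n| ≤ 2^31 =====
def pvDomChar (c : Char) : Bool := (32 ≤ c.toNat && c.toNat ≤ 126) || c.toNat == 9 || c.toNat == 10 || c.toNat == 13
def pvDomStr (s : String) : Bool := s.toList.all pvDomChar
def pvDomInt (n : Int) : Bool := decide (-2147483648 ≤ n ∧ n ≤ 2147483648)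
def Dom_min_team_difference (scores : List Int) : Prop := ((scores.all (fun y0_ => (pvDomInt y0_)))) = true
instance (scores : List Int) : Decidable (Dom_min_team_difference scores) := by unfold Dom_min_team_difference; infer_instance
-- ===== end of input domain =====

-- B replaces A's enumeration of all 252 five-index combinations by an exactly-k subset-sum DP
-- over the first ten scores; equal return values are proved for lists of length ≥ 10.

-- ===== PORT A =====
-- min_diff : Option Int models min_diff (none = float('inf')); pvMinStep is 'min(min_diff, diff)'
def pvMinStep (a : Option Int) (d : Int) : Option Int :=
  some (match a with | none => d | some m => min m d)

-- the 'for team1 in combinations(range(10),5)' loop with the 'if min_diff == 0: break' early exit;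
-- scores[i] is ported as pyGetD (the index is in range under Pre_)
def pvLoopA (scores : List Int) (total : Int) : List (List Int) → Option Int → Option Int
  | [], acc => acc
  | c :: rest, acc =>
    let team1_score := (c.map (fun i => PySem.List.pyGetD scores i 0)).sum
    let team2_score := total - team1_score
    let diff := |team1_score - team2_score|
    let acc' : Option Int := pvMinStep acc diff
    if acc' = some 0 then acc' else pvLoopA scores total rest acc'

def min_team_difference (scores : List Int) : Int :=
  let total_score := scores.sum
  (pvLoopA scores total_score
      (PySem.List.combinations (PySem.List.pyRange 0 10 1) 5) none).getD 0
  -- .getD 0 is unreachable: combinations(range(10), 5) is nonempty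

-- ===== PORT B =====
-- one body of Source B's 'for x in scores[:10]' loop: each dk gains the old d(k-1) shifted by x
def pvStepB (x : Int)
    (st : PySem.Set Int × PySem.Set Int × PySem.Set Int × PySem.Set Int × PySem.Set Int × PySem.Set Int) :
    PySem.Set Int × PySem.Set Int × PySem.Set Int × PySem.Set Int × PySem.Set Int × PySem.Set Int :=
  match st with
  | (d0, d1, d2, d3, d4, d5) =>
    (d0,
     PySem.Set.union d1 (d0.map (fun s => s + x)),
     PySem.Set.union d2 (d1.map (fun s => s + x)),
     PySem.Set.union d3 (d2.map (fun s => s + x)),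
     PySem.Set.union d4 (d3.map (fun s => s + x)),
     PySem.Set.union d5 (d4.map (fun s => s + x)))

def min_team_difference_alt (scores : List Int) : Int :=
  let total := scores.sum
  let st := (PySem.List.slice scores none (some 10)).foldl (fun st x => pvStepB x st)
      (([0] : PySem.Set Int), PySem.Set.empty, PySem.Set.empty, PySem.Set.empty, PySem.Set.empty, PySem.Set.empty)
  (PySem.List.min? (st.2.2.2.2.2.map (fun s => |2 * s - total|)) (fun y => y)).getD 0
  -- .getD 0 is unreachable under Pre_: d5 is nonempty when ten scores exist

-- ===== PRECONDITION & SPEC =====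
-- Pre_ excludes lists with fewer than 10 scores: there A raises IndexError, except when an accidental
-- early perfect split triggers the break first and A returns 0 before reaching an out-of-range index.
def Pre_min_team_difference (scores : List Int) : Prop := 10 ≤ scores.length
instance (scores : List Int) : Decidable (Pre_min_team_difference scores) := by unfold Pre_min_team_difference; infer_instance
def pvWitness_min_team_difference : List Int := [3, 1, 4, 1, 5, 9, 2, 6, 5, 3]

def Spec_min_team_difference (scores : List Int) (out : Int) : Prop := out = min_team_difference_alt scores
instance (scores : List Int) (out : Int) : Decidable (Spec_min_team_difference scores out) := by unfold Spec_min_team_difference; infer_instance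

-- ===== CLAIM (what is proved, stated in full; the proofs are below) =====
def Claim_equal_min_team_difference : Prop := ∀ (scores : List Int), Dom_min_team_difference scores → Pre_min_team_difference scores → Spec_min_team_difference scores (min_team_difference scores)

-- ===== LEMMAS AND PROOFS =====

theorem pvFoldl_minStep_some (ds : List Int) (m : Int) :
    ds.foldl pvMinStep (some m) = some (ds.foldl min m) := by
  induction ds generalizing m with
  | nil => rfl
  | cons d t ih => simp [pvMinStep, ih]

theorem pvFoldl_minStep_zero (ds : List Int) (h : ∀ d ∈ ds, 0 ≤ d) :
    ds.foldl pvMinStep (some 0) = some 0 := by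
  induction ds with
  | nil => rfl
  | cons d t ih =>
    have h0 : min 0 d = 0 := min_eq_left (h d (by simp))
    simp only [List.foldl_cons, pvMinStep, h0]
    exact ih (fun x hx => h x (by simp [hx]))

theorem pvFoldl_minStep_eq_min? (ds : List Int) :
    ds.foldl pvMinStep none = PySem.List.min? ds (fun y => y) := by
  cases ds with
  | nil => rfl
  | cons d t =>
    rw [PySem.List.min?_id_cons]
    simpa [pvMinStep] using pvFoldl_minStep_some t d

theorem pvLoopA_eq_foldl (scores : List Int) (total : Int) (l : List (List Int)) (acc : Option Int) :
    pvLoopA scores total l acc =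
      (l.map (fun c => |((c.map (fun i => PySem.List.pyGetD scores i 0)).sum) -
        (total - (c.map (fun i => PySem.List.pyGetD scores i 0)).sum)|)).foldl pvMinStep acc := by
  induction l generalizing acc with
  | nil => rfl
  | cons c rest ih =>
    simp only [pvLoopA, List.map_cons, List.foldl_cons]
    set d := |((c.map (fun i => PySem.List.pyGetD scores i 0)).sum) -
        (total - (c.map (fun i => PySem.List.pyGetD scores i 0)).sum)| with hd
    by_cases h : pvMinStep acc d = some 0
    · rw [if_pos h, h]
      symm
      rw [pvFoldl_minStep_zero]
      intro x hx
      simp only [List.mem_map] at hx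
      obtain ⟨c', _, rfl⟩ := hx
      exact abs_nonneg _
    · rw [if_neg h]
      exact ih (pvMinStep acc d)

-- min? with identity key depends only on membership
theorem pvMin?_eq_iff (l : List Int) (m : Int) :
    PySem.List.min? l (fun y => y) = some m ↔ m ∈ l ∧ ∀ x ∈ l, m ≤ x := by
  constructor
  · intro h
    exact ⟨PySem.List.min?_mem h, fun x hx => PySem.List.min?_isMin h x hx⟩
  · rintro ⟨hm, hle⟩
    cases hl : PySem.List.min? l (fun y => y) with
    | none =>
      rw [PySem.List.min?_eq_none_iff] at hl
      simp [hl] at hm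
    | some m' =>
      have h1 := PySem.List.min?_mem hl
      have h2 := PySem.List.min?_isMin hl
      have := le_antisymm (hle m' h1) (h2 m hm)
      simp [this]

theorem pvMin?_congr_mem (l1 l2 : List Int) (h : ∀ x, x ∈ l1 ↔ x ∈ l2) :
    PySem.List.min? l1 (fun y => y) = PySem.List.min? l2 (fun y => y) := by
  cases hl : PySem.List.min? l1 (fun y => y) with
  | none =>
    rw [PySem.List.min?_eq_none_iff] at hl
    subst hl
    cases hl2 : PySem.List.min? l2 (fun y => y) with
    | none => rfl
    | some m => have := PySem.List.min?_mem hl2; rw [← h] at this; simp at this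
  | some m =>
    rw [pvMin?_eq_iff] at hl
    symm
    rw [pvMin?_eq_iff]
    exact ⟨(h m).1 hl.1, fun x hx => hl.2 x ((h x).2 hx)⟩

-- reachability: s is the sum of a length-k sublist of l
def pvReach (l : List Int) (k : Nat) (s : Int) : Prop :=
  ∃ t : List Int, t.Sublist l ∧ t.length = k ∧ t.sum = s

theorem pvReach_nil (k : Nat) (s : Int) : pvReach [] k s ↔ (k = 0 ∧ s = 0) := by
  constructor
  · rintro ⟨t, ht, hlen, rfl⟩
    rw [List.sublist_nil] at ht
    subst ht
    simp at hlen ⊢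
    omega
  · rintro ⟨rfl, rfl⟩
    exact ⟨[], List.nil_sublist _, rfl, rfl⟩

theorem pvSublist_concat_iff (t l : List Int) (x : Int) :
    t.Sublist (l ++ [x]) ↔ t.Sublist l ∨ ∃ r, r.Sublist l ∧ t = r ++ [x] := by
  constructor
  · intro h
    rcases List.sublist_append_iff.1 h with ⟨a, b, rfl, ha, hb⟩
    rcases List.sublist_singleton.1 hb with rfl | rfl
    · exact Or.inl (by simpa using ha)
    · exact Or.inr ⟨a, ha, rfl⟩
  · rintro (h | ⟨r, hr, rfl⟩)
    · exact h.trans (List.sublist_append_left _ _)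
    · exact hr.append (List.Sublist.refl _)

theorem pvReach_concat (l : List Int) (x : Int) (k : Nat) (s : Int) :
    pvReach (l ++ [x]) (k + 1) s ↔ pvReach l (k + 1) s ∨ ∃ s', pvReach l k s' ∧ s = s' + x := by
  constructor
  · rintro ⟨t, ht, hlen, rfl⟩
    rcases (pvSublist_concat_iff t l x).1 ht with h | ⟨r, hr, rfl⟩
    · exact Or.inl ⟨t, h, hlen, rfl⟩
    · refine Or.inr ⟨r.sum, ⟨r, hr, ?_, rfl⟩, by simp⟩
      simpa using hlen
  · rintro (⟨t, ht, hlen, rfl⟩ | ⟨s', ⟨r, hr, hlen, rfl⟩, rfl⟩)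
    · exact ⟨t, ht.trans (List.sublist_append_left _ _), hlen, rfl⟩
    · exact ⟨r ++ [x], hr.append (List.Sublist.refl _), by simp [hlen], by simp⟩

theorem pvReach_concat_zero (l : List Int) (x : Int) (s : Int) :
    pvReach (l ++ [x]) 0 s ↔ pvReach l 0 s := by
  constructor
  · rintro ⟨t, ht, hlen, rfl⟩
    rw [List.length_eq_zero_iff] at hlen
    subst hlen
    exact ⟨[], List.nil_sublist _, rfl, rfl⟩
  · rintro ⟨t, ht, hlen, rfl⟩
    exact ⟨t, ht.trans (List.sublist_append_left _ _), hlen, rfl⟩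

-- the DP fold of B over a list l
def pvFoldB (l : List Int) :
    PySem.Set Int × PySem.Set Int × PySem.Set Int × PySem.Set Int × PySem.Set Int × PySem.Set Int :=
  l.foldl (fun st x => pvStepB x st)
    (([0] : PySem.Set Int), PySem.Set.empty, PySem.Set.empty, PySem.Set.empty, PySem.Set.empty, PySem.Set.empty)

theorem pvDP_inv (l : List Int) :
    (∀ s, s ∈ (pvFoldB l).1 ↔ pvReach l 0 s) ∧
    (∀ s, s ∈ (pvFoldB l).2.1 ↔ pvReach l 1 s) ∧
    (∀ s, s ∈ (pvFoldB l).2.2.1 ↔ pvReach l 2 s) ∧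
    (∀ s, s ∈ (pvFoldB l).2.2.2.1 ↔ pvReach l 3 s) ∧
    (∀ s, s ∈ (pvFoldB l).2.2.2.2.1 ↔ pvReach l 4 s) ∧
    (∀ s, s ∈ (pvFoldB l).2.2.2.2.2 ↔ pvReach l 5 s) := by
  induction l using List.reverseRecOn with
  | nil =>
    refine ⟨?_, ?_, ?_, ?_, ?_, ?_⟩ <;> intro s <;>
      simp [pvFoldB, pvReach_nil, PySem.Set.empty]
  | append_singleton l x ih =>
    obtain ⟨i0, i1, i2, i3, i4, i5⟩ := ih
    have hstep : pvFoldB (l ++ [x]) = pvStepB x (pvFoldB l) := by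
      simp [pvFoldB, List.foldl_append]
    refine ⟨?_, ?_, ?_, ?_, ?_, ?_⟩ <;> intro s <;>
      rw [hstep] <;>
      simp only [pvStepB]
    · rw [pvReach_concat_zero]; exact i0 s
    · rw [pvReach_concat]
      simp only [PySem.Set.mem_union, List.mem_map]
      constructor
      · rintro (h | ⟨s', hs', rfl⟩)
        · exact Or.inl ((i1 s).1 h)
        · exact Or.inr ⟨s', (i0 s').1 hs', rfl⟩
      · rintro (h | ⟨s', hs', rfl⟩)
        · exact Or.inl ((i1 s).2 h)
        · exact Or.inr ⟨s', (i0 s').2 hs', rfl⟩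
    · rw [pvReach_concat]
      simp only [PySem.Set.mem_union, List.mem_map]
      constructor
      · rintro (h | ⟨s', hs', rfl⟩)
        · exact Or.inl ((i2 s).1 h)
        · exact Or.inr ⟨s', (i1 s').1 hs', rfl⟩
      · rintro (h | ⟨s', hs', rfl⟩)
        · exact Or.inl ((i2 s).2 h)
        · exact Or.inr ⟨s', (i1 s').2 hs', rfl⟩
    · rw [pvReach_concat]
      simp only [PySem.Set.mem_union, List.mem_map]
      constructor
      · rintro (h | ⟨s', hs', rfl⟩)
        · exact Or.inl ((i3 s).1 h)
        · exact Or.inr ⟨s', (i2 s').1 hs', rfl⟩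
      · rintro (h | ⟨s', hs', rfl⟩)
        · exact Or.inl ((i3 s).2 h)
        · exact Or.inr ⟨s', (i2 s').2 hs', rfl⟩
    · rw [pvReach_concat]
      simp only [PySem.Set.mem_union, List.mem_map]
      constructor
      · rintro (h | ⟨s', hs', rfl⟩)
        · exact Or.inl ((i4 s).1 h)
        · exact Or.inr ⟨s', (i3 s').1 hs', rfl⟩
      · rintro (h | ⟨s', hs', rfl⟩)
        · exact Or.inl ((i4 s).2 h)
        · exact Or.inr ⟨s', (i3 s').2 hs', rfl⟩
    · rw [pvReach_concat]
      simp only [PySem.Set.mem_union, List.mem_map]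
      constructor
      · rintro (h | ⟨s', hs', rfl⟩)
        · exact Or.inl ((i5 s).1 h)
        · exact Or.inr ⟨s', (i4 s').1 hs', rfl⟩
      · rintro (h | ⟨s', hs', rfl⟩)
        · exact Or.inl ((i5 s).2 h)
        · exact Or.inr ⟨s', (i4 s').2 hs', rfl⟩

-- the index list of A maps to the first ten scores
theorem pvRange_map_getD (scores : List Int) (h : 10 ≤ scores.length) :
    (PySem.List.pyRange 0 10 1).map (fun i => PySem.List.pyGetD scores i 0) = scores.take 10 := by
  rw [PySem.List.pyRange_one, List.map_map]
  have h1 : ((fun i => PySem.List.pyGetD scores i 0) ∘ fun k : Nat => (0 : Int) + k) =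
      fun k : Nat => scores.getD k 0 := by
    funext k
    simp [PySem.List.pyGetD_natCast]
  rw [h1]
  apply List.ext_getElem
  · simp [Nat.min_eq_left h]
  · intro i h1 h2
    have hi : i < 10 := by simpa using h1
    have hil : i < scores.length := by omega
    simp [List.getElem_take, hil]

-- ===== VERDICT (by name: the statement is the Claim_ definition above) =====
set_option maxRecDepth 8192 in
theorem min_team_difference_spec : Claim_equal_min_team_difference := by
  intro scores _ hpre
  show min_team_difference scores = min_team_difference_alt scores
  have hpre' : 10 ≤ scores.length := hpre
  show (pvLoopA scores scores.sum (PySem.List.combinations (PySem.List.pyRange 0 10 1) 5) none).getD 0 =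
    (PySem.List.min? ((((PySem.List.slice scores none (some 10)).foldl (fun st x => pvStepB x st)
        (([0] : PySem.Set Int), PySem.Set.empty, PySem.Set.empty, PySem.Set.empty, PySem.Set.empty,
          PySem.Set.empty)).2.2.2.2.2).map (fun s => |2 * s - scores.sum|)) (fun y => y)).getD 0
  rw [pvLoopA_eq_foldl, pvFoldl_minStep_eq_min?, PySem.List.slice_to scores (b := 10) (by norm_num)]
  have hfold :
      ((scores.take (10 : Int).toNat).foldl (fun st x => pvStepB x st)
        (([0] : PySem.Set Int), PySem.Set.empty, PySem.Set.empty, PySem.Set.empty, PySem.Set.empty,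
          PySem.Set.empty))
      = pvFoldB (scores.take 10) := rfl
  rw [hfold]
  congr 1
  apply pvMin?_congr_mem
  intro x
  have hA : ((PySem.List.combinations (PySem.List.pyRange 0 10 1) 5).map
        (fun c => |((c.map (fun i => PySem.List.pyGetD scores i 0)).sum) -
          (scores.sum - (c.map (fun i => PySem.List.pyGetD scores i 0)).sum)|))
      = (PySem.List.combinations (scores.take 10) 5).map
        (fun t => |t.sum - (scores.sum - t.sum)|) := by
    rw [← pvRange_map_getD scores hpre', PySem.List.combinations_map, List.map_map]
    rfl
  rw [hA]
  have hd5 := (pvDP_inv (scores.take 10)).2.2.2.2.2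
  simp only [List.mem_map]
  constructor
  · rintro ⟨t, ht, rfl⟩
    rw [PySem.List.mem_combinations_iff] at ht
    refine ⟨t.sum, (hd5 t.sum).2 ⟨t, ht.1, ht.2, rfl⟩, ?_⟩
    congr 1
    ring
  · rintro ⟨s, hs, rfl⟩
    obtain ⟨t, hsub, hlen, rfl⟩ := (hd5 s).1 hs
    refine ⟨t, (PySem.List.mem_combinations_iff _ _ _).2 ⟨hsub, hlen⟩, ?_⟩
    congr 1
    ring
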